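-- pv_equiv track=rewrite | github.com/Galilevin1/Smoking_Cessation_Microbiome_SCFA | SCFA-Microbiome-Smoking-Analyzing.py | rename_microbes
-- ===== SOURCE A (Python) =====
-- def rename_microbes(features):
--     """
--     Rename microbe features from full taxonomy to readable format.
--
--     Parameters:
--     -----------
--     features : list or array
--         List of full taxonomy strings
--
--     Returns:
--     --------
--     list: Renamed features in readable format
--     """
--     renamed_features = []
--     for feature in features:
--         parts = feature.split(';')
--         Class = next((part.split('__')[1] for part in parts if part.startswith('c__')), '')
--         order = next((part.split('__')[1] for part in parts if part.startswith('o__')), '')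
--         family = next((part.split('__')[1] for part in parts if part.startswith('f__')), '')
--         genus = next((part.split('__')[1] for part in parts if part.startswith('g__')), '')
--         species = next((part.split('__')[1] for part in parts if part.startswith('s__')), '')
--
--         if species != '' and genus != '':
--             renamed_features.append(f"{genus} (g), {species} (s)")
--         elif species == '' and genus != '':
--             renamed_features.append(f"{genus} (g), __(s)")
--         elif genus == '' and family != '':
--             renamed_features.append(f"{family} (f), __(g), __(s)")
--         elif family == '' and order != '':
--             renamed_features.append(f"{order} (o), __(f), __(g), __(s)")
--         elif order == '':
--             renamed_features.append(f"{Class} (c), __(o), __(f), __(g), __(s)")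
--         else:
--             # Fallback if nothing found
--             renamed_features.append(feature)
--
--     return renamed_features
-- ===== SOURCE B (Python) =====
-- def rename_microbes(features):
--     """Rename microbe features from full taxonomy to readable format."""
--
--     def first(parts, letter):
--         for part in parts:
--             if part.startswith(letter + '__'):
--                 return part.split('__')[1]
--         return ''
--
--     def pick(parts):
--         # deepest named rank above species, falling back to class
--         for letter in 'gfo':
--             name = first(parts, letter)
--             if name != '':
--                 return letter, name
--         return 'c', first(parts, 'c')
--
--     ranks = 'cofgs'
--     renamed = []
--     for feature in features:
--         parts = feature.split(';')
--         letter, name = pick(parts)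
--         rest = ranks[ranks.index(letter) + 1:]
--         pieces = [f"{name} ({letter})"] + [f"__({x})" for x in rest]
--         if letter == 'g':
--             species = first(parts, 's')
--             if species != '':
--                 pieces[1] = f"{species} (s)"
--         renamed.append(", ".join(pieces))
--     return renamed
-- ===== Notes on version B (the rewrite author's own statement) =====
-- stated objective: alternative
-- what changed: B replaces A's five unconditional field extractions plus a literal if/elif ladder (with a dead fallback branch) by a descent of the rank ladder g->f->o->c that stops at the first named rank, then builds the output compositionally as a joined list of one label plus generated '__(x)' placeholders, with species filling the last slot when the genus was named.
import Mathlib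
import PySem

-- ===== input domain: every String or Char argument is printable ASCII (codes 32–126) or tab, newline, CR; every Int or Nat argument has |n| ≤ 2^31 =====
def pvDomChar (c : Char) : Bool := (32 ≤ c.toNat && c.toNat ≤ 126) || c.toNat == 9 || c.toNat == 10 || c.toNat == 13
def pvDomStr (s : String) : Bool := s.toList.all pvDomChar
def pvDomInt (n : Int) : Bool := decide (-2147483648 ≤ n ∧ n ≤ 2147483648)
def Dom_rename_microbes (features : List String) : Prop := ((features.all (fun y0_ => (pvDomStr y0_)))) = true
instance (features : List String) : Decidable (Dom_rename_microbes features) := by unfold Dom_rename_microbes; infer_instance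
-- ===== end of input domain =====

-- B replaces A's five field extractions + if/elif ladder by a descent of the rank ladder
-- g→f→o→c stopping at the first named rank, building the output as a joined piece list
-- (objective: alternative decomposition; same cost).

-- ===== PORT A =====
-- next((part.split('__')[1] for part in parts if part.startswith(pfx)), '')
-- the inner [1] is exact: the generator only yields for parts starting with pfx = "ℓ__",
-- so split('__') has at least two pieces and the index never raises (getD "" is unreachable).
def pvTaxFirst (parts : List String) (pfx : String) : String :=
  match parts.find? (fun part => PySem.Str.startswith part pfx) with
  | some part => (PySem.List.pyGet? ((PySem.Str.split? part "__").getD []) 1).getD ""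
  | none => ""

-- one feature: the body of A's loop ((split? _ ";").getD [] is exact: ";" ≠ "")
def pvRenameA (feature : String) : String :=
  let parts := (PySem.Str.split? feature ";").getD []
  let Class := pvTaxFirst parts "c__"
  let order := pvTaxFirst parts "o__"
  let family := pvTaxFirst parts "f__"
  let genus := pvTaxFirst parts "g__"
  let species := pvTaxFirst parts "s__"
  if species ≠ "" ∧ genus ≠ "" then genus ++ " (g), " ++ species ++ " (s)"
  else if species = "" ∧ genus ≠ "" then genus ++ " (g), __(s)"
  else if genus = "" ∧ family ≠ "" then family ++ " (f), __(g), __(s)"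
  else if family = "" ∧ order ≠ "" then order ++ " (o), __(f), __(g), __(s)"
  else if order = "" then Class ++ " (c), __(o), __(f), __(g), __(s)"
  else feature

def rename_microbes (features : List String) : List String :=
  features.foldl (fun acc feature => acc ++ [pvRenameA feature]) []

-- ===== PORT B =====
-- first(parts, letter): loop with early return; split('__')[1] is exact as in A's port
def pvFirstB : List String → Char → String
  | [], _ => ""
  | part :: ps, letter =>
    if PySem.Str.startswith part (String.ofList [letter, '_', '_']) then
      (PySem.List.pyGet? ((PySem.Str.split? part "__").getD []) 1).getD ""
    else pvFirstB ps letter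

-- pick(parts): for letter in 'gfo': … return; fallback ('c', first(parts,'c'))
def pvPickLoop : List Char → List String → Char × String
  | [], parts => ('c', pvFirstB parts 'c')
  | l :: ls, parts =>
    let name := pvFirstB parts l
    if name ≠ "" then (l, name) else pvPickLoop ls parts

def pvPick (parts : List String) : Char × String := pvPickLoop "gfo".toList parts

-- body of B's loop: rest = ranks[ranks.index(letter)+1:] — letter is always in "cofgs",
-- so Python's .index never raises and PySem.Str.find (-1 if absent) is exact here.
def pvRenameB (feature : String) : String :=
  let parts := (PySem.Str.split? feature ";").getD []
  match pvPick parts with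
  | (letter, name) =>
    let rest := PySem.Str.slice "cofgs" (some (PySem.Str.find "cofgs" (String.ofList [letter]) + 1)) none
    let pieces := (name ++ " (" ++ String.ofList [letter] ++ ")") ::
      rest.toList.map (fun x => "__(" ++ String.ofList [x] ++ ")")
    let pieces := if letter == 'g' then
        let species := pvFirstB parts 's'
        if species ≠ "" then pieces.set 1 (species ++ " (s)") else pieces
      else pieces
    PySem.Str.join ", " pieces

def rename_microbes_alt (features : List String) : List String :=
  features.foldl (fun acc feature => acc ++ [pvRenameB feature]) []

-- ===== PRECONDITION & SPEC =====
def Spec_rename_microbes (features : List String) (out : List String) : Prop := out = rename_microbes_alt features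
instance (features : List String) (out : List String) : Decidable (Spec_rename_microbes features out) := by unfold Spec_rename_microbes; infer_instance

-- ===== CLAIM =====
def Claim_equal_rename_microbes : Prop := ∀ (features : List String), Dom_rename_microbes features → Spec_rename_microbes features (rename_microbes features)

-- ===== LEMMAS AND PROOFS =====

-- B's first(parts, ℓ) is A's next(...) with prefix "ℓ__"
lemma pvFirstB_eq (ps : List String) (ℓ : Char) :
    pvFirstB ps ℓ = pvTaxFirst ps (String.ofList [ℓ, '_', '_']) := by
  induction ps with
  | nil => simp [pvFirstB, pvTaxFirst]
  | cons p ps ih =>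
    simp only [pvFirstB, pvTaxFirst, List.find?_cons]
    by_cases h : PySem.Chars.startswith p.toList [ℓ, '_', '_'] = true
    · simp [h]
    · simp only [Bool.not_eq_true] at h
      simp [h, ih, pvTaxFirst]

lemma pvJoin_cons2 (sep a b : String) (r : List String) :
    PySem.Str.join sep (a :: b :: r) = a ++ sep ++ PySem.Str.join sep (b :: r) := by
  rw [← String.toList_inj]
  simp [PySem.Str.toList_join, PySem.Chars.join_cons_cons]

lemma pvJoin_one (sep a : String) : PySem.Str.join sep [a] = a := by
  rw [← String.toList_inj]
  simp [PySem.Str.toList_join, PySem.Chars.join_singleton]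

lemma pvRename_eq (feature : String) : pvRenameA feature = pvRenameB feature := by
  have r_g : PySem.Str.slice "cofgs" (some (PySem.Str.find "cofgs" (String.ofList ['g']) + 1)) none = "s" := by decide
  have r_f : PySem.Str.slice "cofgs" (some (PySem.Str.find "cofgs" (String.ofList ['f']) + 1)) none = "gs" := by decide
  have r_o : PySem.Str.slice "cofgs" (some (PySem.Str.find "cofgs" (String.ofList ['o']) + 1)) none = "fgs" := by decide
  have r_c : PySem.Str.slice "cofgs" (some (PySem.Str.find "cofgs" (String.ofList ['c']) + 1)) none = "ofgs" := by decide
  unfold pvRenameA pvRenameB pvPick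
  rw [show ("gfo" : String).toList = ['g', 'f', 'o'] from rfl]
  simp only [pvPickLoop, pvFirstB_eq,
    show String.ofList ['g', '_', '_'] = "g__" from rfl,
    show String.ofList ['f', '_', '_'] = "f__" from rfl,
    show String.ofList ['o', '_', '_'] = "o__" from rfl,
    show String.ofList ['c', '_', '_'] = "c__" from rfl,
    show String.ofList ['s', '_', '_'] = "s__" from rfl]
  set parts := (PySem.Str.split? feature ";").getD [] with hparts
  set c := pvTaxFirst parts "c__" with hc
  set o := pvTaxFirst parts "o__" with ho
  set f := pvTaxFirst parts "f__" with hf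
  set g := pvTaxFirst parts "g__" with hg
  set s := pvTaxFirst parts "s__" with hs
  by_cases hG : g = "" <;> by_cases hS : s = "" <;> by_cases hF : f = "" <;> by_cases hO : o = "" <;>
    simp only [hG, hS, hF, hO, ne_eq, not_true_eq_false, not_false_eq_true, and_true, and_false,
      if_true, if_false, r_g, r_f, r_o, r_c,
      show ("s" : String).toList = ['s'] from rfl,
      show ("gs" : String).toList = ['g', 's'] from rfl,
      show ("fgs" : String).toList = ['f', 'g', 's'] from rfl,
      show ("ofgs" : String).toList = ['o', 'f', 'g', 's'] from rfl,
      List.map, List.set, beq_self_eq_true, Char.reduceBEq] <;>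
  (try rw [← String.toList_inj]) <;>
  simp [pvJoin_cons2, pvJoin_one, String.toList_append]

lemma pvFoldAppend (gfun : String → String) (l : List String) (acc : List String) :
    l.foldl (fun a x => a ++ [gfun x]) acc = acc ++ l.map gfun := by
  induction l generalizing acc with
  | nil => simp
  | cons x xs ih => simp [ih]

-- ===== VERDICT =====
theorem rename_microbes_spec : Claim_equal_rename_microbes := by
  intro features _
  unfold Spec_rename_microbes rename_microbes rename_microbes_alt
  rw [pvFoldAppend, pvFoldAppend]
  simp [pvRename_eq]
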